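-- pv_equiv track=rewrite | github.com/willidert/desafio | desafio/desafio_sedecti/api_regras_de_negocio.py | validar_endereco
-- ===== SOURCE A (Python) =====
-- def validar_endereco(endereco):
--     import string
--
--     PERMITIDAS_INICIO = list(string.ascii_uppercase)
--     PONTUACAO = list(string.punctuation)
--     PERMITIDAS_MEIO = list(string.ascii_letters) + list(string.digits) + [" "] + PONTUACAO
--
--     if endereco[0] in PERMITIDAS_INICIO:
--         for i in range(len(endereco)):
--             if (endereco[i] not in PERMITIDAS_MEIO or (i < (len(endereco)-1) and (endereco[i] in PONTUACAO) and (endereco[i+1] in PONTUACAO))):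
--                 return False
--         return True
--     return False
-- ===== SOURCE B (Python) =====
-- def validar_endereco(endereco):
--     import string
--
--     primeiro = endereco[0]  # preserves the IndexError on empty input
--
--     PONTUACAO = set(string.punctuation)
--     PERMITIDAS_MEIO = set(string.ascii_letters) | set(string.digits) | {" "} | PONTUACAO
--
--     if primeiro not in string.ascii_uppercase:
--         return False
--     if not set(endereco) <= PERMITIDAS_MEIO:
--         return False
--     # run-length encode the string by its punctuation flag;
--     # valid iff every punctuation run has length exactly 1
--     runs = []  # list of [flag, length] for maximal runs of equal flag
--     for c in endereco:
--         k = c in PONTUACAO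
--         if runs and runs[-1][0] == k:
--             runs[-1][1] += 1
--         else:
--             runs.append([k, 1])
--     return all(n <= 1 for k, n in runs if k)
-- ===== Notes on version B (the rewrite author's own statement) =====
-- stated objective: alternative
-- what changed: Replaces A's fused index loop (per-index membership plus lookahead at i+1) with staged checks: a first-character test, a set-subset test set(endereco) <= PERMITIDAS_MEIO, and a run-length encoding of the string by punctuation flag checked for every punctuation run having length 1.
import Mathlib
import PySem

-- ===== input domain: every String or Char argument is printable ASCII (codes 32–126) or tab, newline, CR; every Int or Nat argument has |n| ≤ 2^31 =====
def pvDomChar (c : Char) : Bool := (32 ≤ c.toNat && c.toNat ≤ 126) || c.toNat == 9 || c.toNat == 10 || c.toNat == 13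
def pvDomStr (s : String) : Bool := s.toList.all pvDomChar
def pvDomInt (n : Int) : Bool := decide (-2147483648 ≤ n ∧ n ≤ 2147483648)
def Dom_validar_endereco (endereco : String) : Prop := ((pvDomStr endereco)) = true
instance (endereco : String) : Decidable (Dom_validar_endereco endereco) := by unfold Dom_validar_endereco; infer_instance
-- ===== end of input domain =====

-- B replaces A's fused index loop with staged checks: first-char test, set-subset test, and a
-- run-length encoding by punctuation flag in which every punctuation run must have length 1
-- (objective: alternative structure, same cost class).

-- shared context constants (the `string` module data both Pythons build their tables from)
def pvUpper : List Char := "ABCDEFGHIJKLMNOPQRSTUVWXYZ".toList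
def pvLetters : List Char := "abcdefghijklmnopqrstuvwxyzABCDEFGHIJKLMNOPQRSTUVWXYZ".toList
def pvDigits : List Char := "0123456789".toList
def pvPunct : List Char := "!\"#$%&'()*+,-./:;<=>?@[\\]^_`{|}~".toList

-- ===== PORT A =====
def pvMeio : List Char := pvLetters ++ pvDigits ++ [' '] ++ pvPunct

-- literal port: `endereco[0]` is pyGet? (none = IndexError, excluded by Pre_); the index
-- loop with its early `return False` is `all` over range(len(endereco)) of the negated condition
def validar_endereco (endereco : String) : Bool :=
  let cs := endereco.toList
  match PySem.List.pyGet? cs 0 with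
  | none => false   -- Python raises IndexError here; excluded by Pre_
  | some c0 =>
    if pvUpper.contains c0 then
      (PySem.List.pyRange 0 cs.length 1).all (fun i =>
        !(!pvMeio.contains (PySem.List.pyGetD cs i ' ')
          || (decide (i < (cs.length : Int) - 1)
              && pvPunct.contains (PySem.List.pyGetD cs i ' ')
              && pvPunct.contains (PySem.List.pyGetD cs (i+1) ' '))))
    else false

-- ===== PORT B =====
-- the punctuation / allowed sets Source B builds (Python sets, under PySem.Set)
def pvPunctSet : PySem.Set Char := PySem.Set.ofList pvPunct
def pvMeioSet : PySem.Set Char :=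
  PySem.Set.union (PySem.Set.union (PySem.Set.union (PySem.Set.ofList pvLetters) pvDigits) [' ']) pvPunctSet

-- the run-length-encoding step of Source B's loop: extend the last run or start a new one
def pvStepRun (runs : List (Bool × Nat)) (c : Char) : List (Bool × Nat) :=
  let k := pvPunctSet.contains c
  match runs.getLast? with
  | some (k0, n0) => if k0 == k then runs.dropLast ++ [(k0, n0 + 1)] else runs ++ [(k, 1)]
  | none => runs ++ [(k, 1)]

-- port of Source B: first-char check, set-subset check, then the run-length-encoding pass
def validar_endereco_alt (endereco : String) : Bool :=
  let cs := endereco.toList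
  match PySem.List.pyGet? cs 0 with
  | none => false   -- Python raises IndexError here; excluded by Pre_
  | some primeiro =>
    if !pvUpper.contains primeiro then false
    else if !PySem.Set.issubset (PySem.Set.ofList cs) pvMeioSet then false
    else
      (cs.foldl pvStepRun []).all (fun r => !r.1 || decide (r.2 ≤ 1))

-- ===== PRECONDITION & SPEC =====
-- Pre_ excludes only the empty string, on which Python A raises IndexError (B raises too).
def Pre_validar_endereco (endereco : String) : Prop := endereco ≠ ""
instance (endereco : String) : Decidable (Pre_validar_endereco endereco) := by unfold Pre_validar_endereco; infer_instance
def pvWitness_validar_endereco : String := "Rua 1, n.2"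
def Spec_validar_endereco (endereco : String) (out : Bool) : Prop := out = validar_endereco_alt endereco
instance (endereco : String) (out : Bool) : Decidable (Spec_validar_endereco endereco out) := by unfold Spec_validar_endereco; infer_instance

-- ===== CLAIM (what is proved, stated in full; the proofs are below) =====
def Claim_equal_validar_endereco : Prop := ∀ (endereco : String), Dom_validar_endereco endereco → Pre_validar_endereco endereco → Spec_validar_endereco endereco (validar_endereco endereco)

-- ===== LEMMAS AND PROOFS =====

-- proof-side helpers: a right-recursive form of the RLE and a "no adjacent punctuation
-- starting from flag k" predicate
def pvExt (k : Bool) (n : Nat) : List Char → List (Bool × Nat)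
  | [] => [(k, n)]
  | c :: r =>
    if pvPunct.contains c == k then pvExt k (n + 1) r
    else (k, n) :: pvExt (pvPunct.contains c) 1 r

def pvR (k : Bool) : List Char → Bool
  | [] => true
  | c :: r => !(k && pvPunct.contains c) && pvR (pvPunct.contains c) r

theorem pvPunctSet_eq : pvPunctSet = pvPunct := by
  unfold pvPunctSet
  apply PySem.Set.ofList_eq_self_of_nodup
  decide

-- A's loop (over range(len)) in quantifier form, then as "all chars allowed ∧ no adjacent pair"
theorem zip_any_iff (cs : List Char) :
    ((cs.zip cs.tail).any (fun p => pvPunct.contains p.1 && pvPunct.contains p.2) = true) ↔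
      ∃ j : Nat, ∃ h : j + 1 < cs.length, pvPunct.contains (cs[j]'(by omega)) = true ∧ pvPunct.contains (cs[j+1]'h) = true := by
  simp only [List.any_eq_true, List.mem_iff_getElem, List.length_zip, List.length_tail,
    List.getElem_zip, List.getElem_tail, Bool.and_eq_true]
  constructor
  · rintro ⟨p, ⟨j, hj, rfl⟩, h1, h2⟩
    exact ⟨j, by omega, by simpa using h1, by simpa using h2⟩
  · rintro ⟨j, hj, h1, h2⟩
    exact ⟨(cs[j]'(by omega), cs[j+1]'hj), ⟨j, by omega, rfl⟩, by simpa using h1, by simpa using h2⟩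

theorem loop_eq (cs : List Char) :
    ((PySem.List.pyRange 0 cs.length 1).all (fun i =>
        !(!pvMeio.contains (PySem.List.pyGetD cs i ' ')
          || (decide (i < (cs.length : Int) - 1)
              && pvPunct.contains (PySem.List.pyGetD cs i ' ')
              && pvPunct.contains (PySem.List.pyGetD cs (i+1) ' ')))))
    = (cs.all (fun c => pvMeio.contains c) && !((cs.zip cs.tail).any (fun p => pvPunct.contains p.1 && pvPunct.contains p.2))) := by
  rw [PySem.List.pyRange_zero_nat, Bool.eq_iff_iff]
  rw [Bool.and_eq_true, Bool.not_eq_true', ← Bool.not_eq_true ((cs.zip cs.tail).any _)]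
  rw [zip_any_iff]
  simp only [List.all_map, List.all_eq_true, List.mem_range, Function.comp,
    PySem.List.pyGetD_natCast, Bool.not_eq_true', Bool.or_eq_false_iff,
    Bool.and_eq_false_iff, decide_eq_false_iff_not, not_lt]
  constructor
  · rintro h
    constructor
    · intro c hc
      obtain ⟨i, hi, rfl⟩ := List.mem_iff_getElem.mp hc
      have := (h i hi).1
      rw [List.getD_eq_getElem _ _ hi] at this
      simpa using this
    · rintro ⟨j, hj, h1, h2⟩
      have hj' : j < cs.length := by omega
      have := (h j hj').2
      rw [List.getD_eq_getElem _ _ hj'] at this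
      have hcast : ((j : Int) + 1) = ((j + 1 : Nat) : Int) := by push_cast; ring
      rw [hcast, PySem.List.pyGetD_natCast, List.getD_eq_getElem _ _ hj] at this
      rcases this with (hle | hP) | hP
      · omega
      · simp at h1 hP; exact hP h1
      · simp at h2 hP; exact hP h2
  · rintro ⟨hall, hpair⟩ i hi
    rw [List.getD_eq_getElem _ _ hi]
    refine ⟨by simpa using hall _ (List.getElem_mem hi), ?_⟩
    by_cases hlt : i + 1 < cs.length
    · by_cases hP1 : pvPunct.contains cs[i] = true
      · right
        have hcast : ((i : Int) + 1) = ((i + 1 : Nat) : Int) := by push_cast; ring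
        rw [hcast, PySem.List.pyGetD_natCast, List.getD_eq_getElem _ _ hlt]
        by_contra hP2
        exact hpair ⟨i, hlt, hP1, by simpa using hP2⟩
      · left; right; simpa using hP1
    · left; left; omega

-- B's subset test is the per-character membership condition
theorem subset_eq (cs : List Char) :
    PySem.Set.issubset (PySem.Set.ofList cs) pvMeioSet = cs.all (fun c => pvMeio.contains c) := by
  rw [Bool.eq_iff_iff, PySem.Set.issubset_iff, List.all_eq_true]
  constructor
  · intro h c hc
    have := h c (by rw [PySem.Set.mem_ofList]; exact hc)
    simp only [pvMeioSet, PySem.Set.mem_union, PySem.Set.mem_ofList, pvPunctSet] at this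
    simp only [List.contains_eq_mem, pvMeio, List.mem_append, decide_eq_true_eq]
    tauto
  · intro h c hc
    rw [PySem.Set.mem_ofList] at hc
    have := h c hc
    simp only [List.contains_eq_mem, pvMeio, List.mem_append, decide_eq_true_eq] at this
    simp only [pvMeioSet, PySem.Set.mem_union, PySem.Set.mem_ofList, pvPunctSet]
    tauto

-- Source B's left-to-right RLE fold equals the right-recursive form
theorem foldl_step_eq (cs : List Char) : ∀ (pre : List (Bool × Nat)) (k : Bool) (n : Nat),
    List.foldl pvStepRun (pre ++ [(k, n)]) cs = pre ++ pvExt k n cs := by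
  induction cs with
  | nil => intro pre k n; simp [pvExt]
  | cons c r ih =>
    intro pre k n
    have hstep : pvStepRun (pre ++ [(k, n)]) c =
        if pvPunct.contains c = k then pre ++ [(k, n + 1)] else (pre ++ [(k, n)]) ++ [(pvPunct.contains c, 1)] := by
      simp only [pvStepRun, pvPunctSet_eq, PySem.Set.contains_eq_listContains,
        List.getLast?_concat, List.dropLast_concat]
      cases hq : pvPunct.contains c <;> cases k <;> simp
    rw [List.foldl_cons, hstep]
    by_cases h : pvPunct.contains c = k
    · rw [if_pos h, ih pre k (n + 1)]
      have : pvExt k n (c :: r) = pvExt k (n + 1) r := by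
        simp only [pvExt]
        rw [if_pos (beq_iff_eq.mpr h)]
      rw [this]
    · rw [if_neg h, ih (pre ++ [(k, n)]) (pvPunct.contains c) 1]
      have : pvExt k n (c :: r) = (k, n) :: pvExt (pvPunct.contains c) 1 r := by
        simp only [pvExt]
        rw [if_neg (by simpa using h)]
      rw [this, List.append_assoc, List.singleton_append]

-- each run of the right-recursive RLE passes the length check iff no adjacent punctuation follows
theorem ext_all_eq (cs : List Char) : ∀ (k : Bool) (n : Nat), 1 ≤ n →
    (pvExt k n cs).all (fun r => !r.1 || decide (r.2 ≤ 1)) = ((!k || decide (n ≤ 1)) && pvR k cs) := by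
  induction cs with
  | nil => intro k n _; simp [pvExt, pvR]
  | cons c r ih =>
    intro k n hn
    by_cases h : pvPunct.contains c = k
    · have h1 : pvExt k n (c :: r) = pvExt k (n + 1) r := by
        simp only [pvExt]
        rw [if_pos (beq_iff_eq.mpr h)]
      have h2 : pvR k (c :: r) = (!(k && k) && pvR k r) := by
        simp only [pvR, h]
      rw [h1, h2, ih k (n + 1) (by omega)]
      cases hk : pvR k r <;> cases k <;> simp; omega
    · have h1 : pvExt k n (c :: r) = (k, n) :: pvExt (pvPunct.contains c) 1 r := by
        simp only [pvExt]
        rw [if_neg (by simpa using h)]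
      have h2 : pvR k (c :: r) = (!(k && pvPunct.contains c) && pvR (pvPunct.contains c) r) := by
        simp only [pvR]
      rw [h1, h2, List.all_cons, ih (pvPunct.contains c) 1 le_rfl]
      cases k <;> cases hq : pvPunct.contains c <;> simp_all

-- the "no adjacent punctuation" predicate is A's pairwise condition
theorem pvR_eq_zip (r : List Char) : ∀ (c : Char),
    pvR (pvPunct.contains c) r
      = !(((c :: r).zip r).any (fun p => pvPunct.contains p.1 && pvPunct.contains p.2)) := by
  induction r with
  | nil => intro c; simp [pvR]
  | cons d r' ih =>
    intro c
    simp only [pvR, List.zip_cons_cons, List.any_cons, Bool.not_or, ih d]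

-- B's RLE pass in closed form on a non-empty string
theorem runs_eq (c : Char) (r : List Char) :
    ((List.foldl pvStepRun [] (c :: r)).all (fun p => !p.1 || decide (p.2 ≤ 1)))
      = !(((c :: r).zip r).any (fun p => pvPunct.contains p.1 && pvPunct.contains p.2)) := by
  have h0 : pvStepRun [] c = [] ++ [(pvPunct.contains c, 1)] := by
    simp [pvStepRun, pvPunctSet_eq]
  rw [List.foldl_cons, h0, foldl_step_eq r [] (pvPunct.contains c) 1, List.nil_append,
    ext_all_eq r (pvPunct.contains c) 1 le_rfl, ← pvR_eq_zip r c]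
  simp

-- ===== VERDICT (by name: the statement is the Claim_ definition above) =====
theorem validar_endereco_spec : Claim_equal_validar_endereco := by
  intro endereco _ _
  unfold Spec_validar_endereco validar_endereco validar_endereco_alt
  cases hcs : endereco.toList with
  | nil => simp [PySem.List.pyGet?, PySem.List.pyIdx?]
  | cons c r =>
    have hget : PySem.List.pyGet? (c :: r) (0 : Int) = some c := by
      simp [PySem.List.pyGet?, PySem.List.pyIdx?]
    have htail : (c :: r).tail = r := rfl
    simp only [hget, loop_eq, subset_eq, runs_eq, htail]
    generalize pvUpper.contains c = u
    generalize ((c :: r).all fun x => pvMeio.contains x) = a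
    generalize (((c :: r).zip r).any fun p => pvPunct.contains p.1 && pvPunct.contains p.2) = z
    cases u <;> cases a <;> cases z <;> rfl
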